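-- pv_equiv track=rewrite | github.com/kaiyiz/Push-Relabel-OT | transport.py | find_ind_range
-- ===== SOURCE A (Python) =====
-- def find_ind_range(ind):
--     n = len(ind)
--     st = 0
--     cur = 0
--     val = ind[st]
--     ret = dict()
--     while(cur < n):
--         if ind[cur] != val:
--             ret[val] = (st, cur-1)
--             st = cur
--             val = ind[st]
--         cur += 1
--     ret[val] = (st, cur-1)
--     return ret
-- ===== SOURCE B (Python) =====
-- def find_ind_range(ind):
--     # Staged construction: first compute the list of run-start indices (index 0
--     # plus every position whose value differs from its predecessor), derive the
--     # run-end indices from it, then pair them up into the result dict.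
--     n = len(ind)
--     starts = [0] + [i for i in range(1, n) if ind[i] != ind[i - 1]]
--     ends = [s - 1 for s in starts[1:]] + [n - 1]
--     return {ind[s]: (s, e) for s, e in zip(starts, ends)}
-- ===== Notes on version B (the rewrite author's own statement) =====
-- stated objective: alternative
-- what changed: B replaces A's stateful single-cursor scan (carrying st/val and flushing on each value change) by a staged construction: one comprehension computes the run-start boundary indices, the end indices are derived arithmetically from the next starts, and a dict comprehension over zip(starts, ends) builds the result; no run state is carried between steps.
import Mathlib
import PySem

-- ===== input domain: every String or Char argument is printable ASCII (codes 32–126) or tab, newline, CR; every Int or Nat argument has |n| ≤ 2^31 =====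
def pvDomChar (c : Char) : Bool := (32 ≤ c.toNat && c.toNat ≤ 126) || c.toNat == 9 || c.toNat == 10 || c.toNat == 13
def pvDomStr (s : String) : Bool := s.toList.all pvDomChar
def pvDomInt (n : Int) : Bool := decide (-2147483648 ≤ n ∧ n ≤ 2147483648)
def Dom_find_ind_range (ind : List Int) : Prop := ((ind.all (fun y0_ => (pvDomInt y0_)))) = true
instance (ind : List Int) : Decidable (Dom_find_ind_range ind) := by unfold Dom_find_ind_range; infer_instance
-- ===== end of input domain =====

-- B builds the result in stages — a comprehension collecting the run-start boundary indices,
-- the end indices derived from the next starts, and a dict comprehension over their zip —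
-- instead of A's stateful single-cursor scan; same cost ("alternative").

-- ===== PORT A =====
-- A's while loop, state (st, cur, val, ret); the Nat fuel only makes the recursion
-- structural (one unit per iteration; the caller supplies len ind, enough since cur
-- starts at 0 and increases by 1 while cur < n).
def find_ind_range_go (ind : List Int) (n st cur val : Int)
    (ret : PySem.Dict Int (Int × Int)) (fuel : Nat) : PySem.Dict Int (Int × Int) :=
    if cur < n then
      match fuel with
      | 0 => ret   -- fuel exhausted: unreachable at the call site
      | fuel + 1 =>
        match PySem.List.pyGet? ind cur with
        | some x =>
          if x ≠ val then
            find_ind_range_go ind n cur (cur + 1) x (ret.insert val (st, cur - 1)) fuel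
          else
            find_ind_range_go ind n st (cur + 1) val ret fuel
        | none => ret   -- IndexError: unreachable when n = len ind and 0 ≤ cur < n
    else
      ret.insert val (st, cur - 1)

def find_ind_range (ind : List Int) : List (Int × Int × Int) :=
  match PySem.List.pyGet? ind 0 with
  | none => []   -- Python raises IndexError here (reading the first element); excluded by Pre_
  | some v => (find_ind_range_go ind (PySem.List.len ind) 0 0 v PySem.Dict.empty ind.length).items

-- ===== PORT B =====
-- starts = [0] + [i for i in range(1, n) if ind[i] != ind[i - 1]]
-- (for i in range(1, n) both indices are in range, so the Option comparison is exact)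
def find_ind_range_starts (ind : List Int) : List Int :=
  0 :: (PySem.List.pyRange 1 (PySem.List.len ind) 1).filter
      (fun i => decide (PySem.List.pyGet? ind i ≠ PySem.List.pyGet? ind (i - 1)))

-- ends = [s - 1 for s in starts[1:]] + [n - 1]
def find_ind_range_ends (ind starts : List Int) : List Int :=
  (PySem.List.slice starts (some 1) none).map (fun s => s - 1) ++ [PySem.List.len ind - 1]

-- {ind[s]: (s, e) for s, e in zip(starts, ends)}
def find_ind_range_alt (ind : List Int) : List (Int × Int × Int) :=
  let starts := find_ind_range_starts ind
  let ends := find_ind_range_ends ind starts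
  ((starts.zip ends).foldl (fun d se =>
      match PySem.List.pyGet? ind se.1 with
      | some v => d.insert v se
      | none => d    -- IndexError (ind[s] on the empty list): unreachable when ind ≠ []
    ) PySem.Dict.empty).items

-- ===== PRECONDITION & SPEC =====
-- A reads the first element before its loop (and B looks it up as the first run's
-- start), so both raise IndexError on the empty list; it is excluded.
def Pre_find_ind_range (ind : List Int) : Prop := ind ≠ []
instance (ind : List Int) : Decidable (Pre_find_ind_range ind) := by unfold Pre_find_ind_range; infer_instance
def pvWitness_find_ind_range : List Int := [1, 1, 2]

def Spec_find_ind_range (ind : List Int) (out : List (Int × Int × Int)) : Prop := out = find_ind_range_alt ind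
instance (ind : List Int) (out : List (Int × Int × Int)) : Decidable (Spec_find_ind_range ind out) := by unfold Spec_find_ind_range; infer_instance

-- ===== CLAIM (what is proved, stated in full; the proofs are below) =====
def Claim_equal_find_ind_range : Prop := ∀ (ind : List Int), Dom_find_ind_range ind → Pre_find_ind_range ind → Spec_find_ind_range ind (find_ind_range ind)

-- ===== LEMMAS AND PROOFS =====

-- length of the run of v at the front of a list
def pvRunLen (v : Int) : List Int → Nat
  | [] => 0
  | x :: t => if x = v then pvRunLen v t + 1 else 0

theorem pvRunLen_le (v : Int) (l : List Int) : pvRunLen v l ≤ l.length := by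
  induction l with
  | nil => simp [pvRunLen]
  | cons x t ih =>
    simp only [pvRunLen, List.length_cons]
    split_ifs <;> omega

-- the maximal runs of a list starting at absolute position pos, as (value, start, end)
def pvRuns (pos : Nat) : List Int → List (Int × Int × Int)
  | [] => []
  | x :: t =>
    (x, (pos : Int), ((pos + pvRunLen x t : Nat) : Int)) ::
      pvRuns (pos + pvRunLen x t + 1) (t.drop (pvRunLen x t))
termination_by rest => rest.length
decreasing_by simp only [List.length_drop, List.length_cons]; omega

-- facts available at a cursor position whose remaining suffix is x :: t
theorem pv_drop_cons {ind : List Int} {pos : Nat} {x : Int} {t : List Int}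
    (h : ind.drop pos = x :: t) :
    PySem.List.pyGet? ind (pos : Int) = some x ∧ ind.drop (pos + 1) = t ∧ pos < ind.length := by
  refine ⟨?_, ?_, ?_⟩
  · rw [PySem.List.pyGet?_natCast]
    have h0 : (ind.drop pos)[0]? = ind[pos]? := by
      rw [List.getElem?_drop, Nat.add_zero]
    rw [← h0, h]; rfl
  · have h1 : ind.drop (pos + 1) = (ind.drop pos).drop 1 := by
      rw [List.drop_drop, Nat.add_comm]
    rw [h1, h, List.drop_one]; rfl
  · by_contra hc
    simp [List.drop_eq_nil_iff.mpr (le_of_not_gt hc)] at h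

theorem pv_drop_add (ind t : List Int) (m r : Nat) (h : ind.drop m = t) :
    ind.drop (m + r) = t.drop r := by
  subst h; rw [List.drop_drop]; try congr 1
  try omega

-- A's loop from cursor cur (suffix rest, pending run of val started at st) inserts
-- the pending run's range and then one range per remaining run, in order.
theorem pv_go_eq (ind : List Int) :
    ∀ (rest : List Int) (cur : Nat) (st val : Int) (ret : PySem.Dict Int (Int × Int)),
      ind.drop cur = rest →
      find_ind_range_go ind (ind.length : Int) st (cur : Int) val ret rest.length
        = ((val, st, ((cur + pvRunLen val rest : Nat) : Int) - 1) ::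
            pvRuns (cur + pvRunLen val rest) (rest.drop (pvRunLen val rest))).foldl
            (fun d r => d.insert r.1 r.2) ret := by
  intro rest
  induction rest with
  | nil =>
    intro cur st val ret hdrop
    have hlen : ind.length ≤ cur := List.drop_eq_nil_iff.mp hdrop
    have hnotlt : ¬ ((cur : Int) < (ind.length : Int)) := by exact_mod_cast not_lt.mpr hlen
    unfold find_ind_range_go
    simp [hnotlt, pvRunLen, pvRuns, List.foldl]
  | cons x t ih =>
    intro cur st val ret hdrop
    obtain ⟨hget, htail, hcur⟩ := pv_drop_cons hdrop
    have hlt : (cur : Int) < (ind.length : Int) := by exact_mod_cast hcur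
    unfold find_ind_range_go
    simp only [List.length_cons, if_pos hlt, hget]
    by_cases hxv : x = val
    · subst hxv
      simp only [ne_eq, not_true_eq_false, if_false]
      have hIH := ih (cur + 1) st x ret htail
      push_cast at hIH
      rw [hIH]
      simp only [pvRunLen, if_true]
      have h1 : (cur : Int) + 1 + (pvRunLen x t : Int) = ((cur + (pvRunLen x t + 1) : Nat) : Int) := by
        push_cast; ring
      have h2 : cur + 1 + pvRunLen x t = cur + (pvRunLen x t + 1) := by omega
      rw [h1, h2, List.drop_succ_cons]
    · simp only [ne_eq, hxv, not_false_eq_true, if_true]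
      have hIH := ih (cur + 1) (cur : Int) x (ret.insert val (st, (cur : Int) - 1)) htail
      push_cast at hIH
      rw [show (cur : Int) + 1 + (pvRunLen x t : Int) - 1 = ((cur + pvRunLen x t : Nat) : Int) by
            push_cast; ring,
          show cur + 1 + pvRunLen x t = cur + pvRunLen x t + 1 by omega] at hIH
      rw [hIH]
      -- desired RHS: runLen val (x :: t) = 0, so the pending run closes at cur - 1
      simp only [pvRunLen, if_neg hxv, Nat.add_zero, List.drop_zero]
      rw [pvRuns]
      simp only [List.foldl_cons]

-- B's boundary comprehension, restricted to indices after pos, lists exactly the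
-- start positions of the runs after the first run of the suffix at pos.
theorem pv_starts_eq (ind : List Int) :
    ∀ (rest : List Int) (pos : Nat), ind.drop pos = rest → rest ≠ [] →
      (PySem.List.pyRange ((pos : Int) + 1) (ind.length : Int) 1).filter
          (fun i => decide (PySem.List.pyGet? ind i ≠ PySem.List.pyGet? ind (i - 1)))
        = (pvRuns pos rest).tail.map (fun r => r.2.1) := by
  intro rest
  induction rest with
  | nil => intro pos _ hne; exact absurd rfl hne
  | cons x t ih =>
    intro pos hdrop _
    obtain ⟨hgetx, htail, hpos⟩ := pv_drop_cons hdrop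
    cases t with
    | nil =>
      have hlen : ind.length = pos + 1 := by
        have := List.drop_eq_nil_iff.mp htail
        omega
      rw [pvRuns]
      rw [PySem.List.pyRange_one_eq_nil (by rw [hlen]; push_cast; omega)]
      simp [pvRuns]
    | cons y t' =>
      obtain ⟨hgety, htail2, hpos1⟩ := pv_drop_cons htail
      have hlt : (pos : Int) + 1 < (ind.length : Int) := by exact_mod_cast hpos1
      rw [PySem.List.pyRange_one_cons hlt, List.filter_cons]
      have hsub : (pos : Int) + 1 - 1 = (pos : Int) := by ring
      have hgy : PySem.List.pyGet? ind ((pos : Int) + 1) = some y := by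
        exact_mod_cast hgety
      by_cases hyx : y = x
      · subst hyx
        simp only [hsub, hgy, hgetx, ne_eq, not_true_eq_false, decide_false, Bool.false_eq_true,
          if_false]
        have hcast : (pos : Int) + 1 + 1 = ((pos + 1 : Nat) : Int) + 1 := by push_cast; ring
        rw [hcast, ih (pos + 1) htail (by exact List.cons_ne_nil _ _)]
        -- the runs after the first coincide whether we start at pos or pos + 1
        rw [pvRuns, pvRuns]
        simp only [pvRunLen, if_true, List.tail_cons, List.drop_succ_cons]
        have h2 : pos + (pvRunLen y t' + 1) + 1 = pos + 1 + pvRunLen y t' + 1 := by omega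
        rw [h2]
      · simp only [hsub, hgy, hgetx, ne_eq, Option.some.injEq, hyx, not_false_eq_true,
          decide_true, if_true]
        have hcast : (pos : Int) + 1 + 1 = ((pos + 1 : Nat) : Int) + 1 := by push_cast; ring
        rw [hcast, ih (pos + 1) htail (by exact List.cons_ne_nil _ _)]
        conv_rhs => rw [pvRuns]
        simp only [pvRunLen, hyx, if_false, Nat.add_zero, List.drop_zero, List.tail_cons]
        rw [pvRuns]
        simp only [List.map_cons]
        congr 1

-- ends derived from the next starts (each start minus one, plus n - 1 for the last run)
-- are exactly the run ends.
theorem pv_ends_eq (ind : List Int) :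
    ∀ (pos : Nat) (rest : List Int), ind.drop pos = rest → rest ≠ [] →
      ((pvRuns pos rest).tail.map (fun r => r.2.1)).map (fun s => s - 1)
          ++ [(ind.length : Int) - 1]
        = (pvRuns pos rest).map (fun r => r.2.2) := by
  intro pos rest
  induction pos, rest using pvRuns.induct with
  | case1 pos => intro _ hne; exact absurd rfl hne
  | case2 pos x t ih =>
    intro hdrop _
    obtain ⟨hgetx, htail, hpos⟩ := pv_drop_cons hdrop
    have hdropk : ind.drop (pos + 1 + pvRunLen x t) = t.drop (pvRunLen x t) :=
      pv_drop_add ind t (pos + 1) (pvRunLen x t) htail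
    have hdropk' : ind.drop (pos + pvRunLen x t + 1) = t.drop (pvRunLen x t) := by
      rw [show pos + pvRunLen x t + 1 = pos + 1 + pvRunLen x t by omega]; exact hdropk
    rw [pvRuns]
    by_cases hnil : t.drop (pvRunLen x t) = []
    · have hklen : pvRunLen x t = t.length := by
        have h1 := pvRunLen_le x t
        have h2 := congrArg List.length hnil
        simp only [List.length_drop, List.length_nil] at h2
        omega
      have hlen : ind.length = pos + 1 + t.length := by
        have h3 := congrArg List.length hdrop
        simp only [List.length_drop, List.length_cons] at h3
        omega
      rw [hnil]
      simp only [pvRuns, List.tail_cons, List.map_nil, List.nil_append, List.map_cons]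
      congr 2
      rw [hklen, hlen]; push_cast; ring
    · obtain ⟨z, u, hzu⟩ := List.exists_cons_of_ne_nil hnil
      have hIH := ih hdropk' hnil
      rw [List.tail_cons, List.map_cons]
      rw [hzu] at hIH ⊢
      rw [pvRuns] at hIH ⊢
      simp only [List.tail_cons, List.map_cons, List.cons_append] at hIH ⊢
      rw [hIH]
      congr 1
      push_cast; ring

-- folding the (start, end) pairs with key ind[start] is folding the runs themselves
theorem pv_fold_eq (ind : List Int) :
    ∀ (pos : Nat) (rest : List Int), ind.drop pos = rest →
      ∀ (d : PySem.Dict Int (Int × Int)),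
      ((pvRuns pos rest).map (fun r => (r.2.1, r.2.2))).foldl
          (fun d se =>
            match PySem.List.pyGet? ind se.1 with
            | some v => d.insert v se
            | none => d) d
        = (pvRuns pos rest).foldl (fun d r => d.insert r.1 r.2) d := by
  intro pos rest
  induction pos, rest using pvRuns.induct with
  | case1 pos => intro _ d; simp [pvRuns]
  | case2 pos x t ih =>
    intro hdrop d
    obtain ⟨hgetx, htail, _⟩ := pv_drop_cons hdrop
    have hdropk' : ind.drop (pos + pvRunLen x t + 1) = t.drop (pvRunLen x t) := by
      rw [show pos + pvRunLen x t + 1 = pos + 1 + pvRunLen x t by omega]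
      exact pv_drop_add ind t (pos + 1) (pvRunLen x t) htail
    rw [pvRuns, List.map_cons, List.foldl_cons, List.foldl_cons]
    simp only [hgetx]
    exact ih (by rw [hdropk']) _

-- ===== VERDICT (by name: the statement is the Claim_ definition above) =====
theorem find_ind_range_spec : Claim_equal_find_ind_range := by
  intro ind _hdom hpre
  unfold Spec_find_ind_range
  cases hind : ind with
  | nil => exact absurd hind hpre
  | cons v t =>
    subst hind
    have hdrop0 : (v :: t).drop 0 = v :: t := rfl
    have hget0 : PySem.List.pyGet? (v :: t) 0 = some v := by simp [pysem]
    have hrl : pvRunLen v (v :: t) = pvRunLen v t + 1 := by simp [pvRunLen]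
    -- A's side: the loop inserts one range per run
    have hA := pv_go_eq (v :: t) (v :: t) 0 0 v PySem.Dict.empty hdrop0
    simp only [Nat.cast_zero, List.length_cons] at hA
    have hruns0 : pvRuns 0 (v :: t) =
        (v, (0 : Int), ((pvRunLen v t : Nat) : Int)) ::
          pvRuns (pvRunLen v t + 1) (t.drop (pvRunLen v t)) := by
      rw [pvRuns]; norm_num
    have hAruns : find_ind_range (v :: t)
        = ((pvRuns 0 (v :: t)).foldl (fun d r => d.insert r.1 r.2) PySem.Dict.empty).items := by
      simp only [find_ind_range, hget0, PySem.List.len_eq, List.length_cons]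
      rw [hA, hruns0]
      simp only [hrl, Nat.zero_add, List.drop_succ_cons]
      rw [show ((pvRunLen v t + 1 : Nat) : Int) - 1 = ((pvRunLen v t : Nat) : Int) by
        push_cast; ring]
    -- B's side: starts/ends are the run starts/ends, and the zip-fold is the run fold
    have hne : (v :: t) ≠ [] := List.cons_ne_nil _ _
    have hS := pv_starts_eq (v :: t) (v :: t) 0 hdrop0 hne
    simp only [Nat.cast_zero, zero_add] at hS
    have hE := pv_ends_eq (v :: t) 0 (v :: t) hdrop0 hne
    have hstarts : find_ind_range_starts (v :: t)
        = (pvRuns 0 (v :: t)).map (fun r => r.2.1) := by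
      unfold find_ind_range_starts
      rw [PySem.List.len_eq, hS, hruns0]
      simp [List.tail_cons, List.map_cons]
    have hends : find_ind_range_ends (v :: t) ((pvRuns 0 (v :: t)).map (fun r => r.2.1))
        = (pvRuns 0 (v :: t)).map (fun r => r.2.2) := by
      unfold find_ind_range_ends
      rw [PySem.List.len_eq, PySem.List.slice_from_one, ← List.map_tail]
      exact hE
    show find_ind_range (v :: t) = find_ind_range_alt (v :: t)
    rw [hAruns]
    unfold find_ind_range_alt
    simp only [hstarts, hends, List.zip_map']
    rw [pv_fold_eq (v :: t) 0 (v :: t) hdrop0 PySem.Dict.empty]
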